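-- pv_equiv track=rewrite | github.com/hyuntae99/Algorithm | Python3/프로그래머스/2/154540. 무인도 여행/무인도 여행.py | solution
-- ===== SOURCE A (Python) =====
-- def solution(maps):
--
--     from collections import deque
--
--     def bfs(si,sj):
--         q = deque()
--         q.append((si,sj))
--         v[si][sj] = 1
--         s = int(maps[si][sj]) # 생존 일수
--
--         # 4방향 탐색
--         while q:
--             ci,cj = q.popleft()
--             for di,dj in ((-1,0),(1,0),(0,-1),(0,1)):
--                 ni,nj = ci+di,cj+dj
--                 # 범위 내 + 방문 x + X가 아님
--                 if 0 <= ni < N and 0 <= nj < M and not v[ni][nj] and maps[ni][nj] != 'X':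
--                     q.append((ni,nj))
--                     v[ni][nj] = 1
--                     s += int(maps[ni][nj])
--         ans.append(s)
--
--     N = len(maps)
--     M = len(maps[0])
--
--     v = [[0] * M for _ in range(N)]
--     ans = []
--     for i in range(N):
--         for j in range(M):
--             # 방문x + X가 아닐 때
--             if not v[i][j] and maps[i][j] != 'X':
--                 bfs(i,j)
--
--     if len(ans) == 0:
--         return [-1]
--     else:
--         return sorted(ans)
-- ===== SOURCE B (Python) =====
-- def solution(maps):
--     n, m = len(maps), len(maps[0])
--     seen = set()
--     sums = []
--     for i in range(n):
--         for j in range(m):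
--             if (i, j) in seen or maps[i][j] == 'X':
--                 continue
--             stack = [(i, j)]
--             seen.add((i, j))
--             total = 0
--             while stack:
--                 ci, cj = stack.pop()
--                 total += int(maps[ci][cj])
--                 for p in ((ci - 1, cj), (ci + 1, cj), (ci, cj - 1), (ci, cj + 1)):
--                     if 0 <= p[0] < n and 0 <= p[1] < m and p not in seen and maps[p[0]][p[1]] != 'X':
--                         seen.add(p)
--                         stack.append(p)
--             sums.append(total)
--     return sorted(sums) if sums else [-1]
-- ===== Notes on version B (the rewrite author's own statement) =====
-- stated objective: alternative
-- what changed: Replaces the per-island BFS (collections.deque popped from the front, an N-by-M visited matrix of 0/1 rows, digits summed when a cell is enqueued) by an iterative DFS flood fill (explicit LIFO stack, a single shared set of visited coordinate pairs, digits summed when a cell is popped); component sums are produced in the same scan order, so the sorted result is identical.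
import Mathlib
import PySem

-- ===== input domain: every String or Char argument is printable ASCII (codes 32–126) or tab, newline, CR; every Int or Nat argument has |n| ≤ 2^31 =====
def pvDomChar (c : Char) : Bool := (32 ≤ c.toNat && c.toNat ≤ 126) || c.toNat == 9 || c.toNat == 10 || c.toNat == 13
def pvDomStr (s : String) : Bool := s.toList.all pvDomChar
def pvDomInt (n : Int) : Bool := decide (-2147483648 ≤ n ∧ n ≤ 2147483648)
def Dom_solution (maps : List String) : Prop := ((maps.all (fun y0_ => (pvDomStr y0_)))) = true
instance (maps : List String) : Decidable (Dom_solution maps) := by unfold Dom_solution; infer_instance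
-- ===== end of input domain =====

-- B replaces A's per-island BFS (deque + 0/1 visited matrix, digits summed on enqueue) by an
-- iterative DFS flood fill (explicit stack + one visited set of coordinates, digits summed on pop);
-- same component sums in the same scan order, hence the same sorted result.


-- Shared accessors: maps[i][j] (out-of-range reads default to 'X'; under Pre_ every access both
-- Pythons make is in range, so this is exact), and int(c) for the digit characters Pre_ guarantees.
def cellAt (maps : List String) (i j : Int) : Char :=
  (((PySem.List.pyGet? maps i).map String.toList).bind fun r => PySem.List.pyGet? r j).getD 'X'

def dval (c : Char) : Int := (c.toNat : Int) - 48

-- ===== PORT A =====  (BFS flood fill: deque popped at the front, visited matrix v of 0/1,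
-- survival days added when a cell is enqueued; fuel bounds the while-loop, 2*N*M+1 is proved enough)
def vget (v : List (List Int)) (i j : Int) : Int :=
  ((PySem.List.pyGet? v i).bind fun r => PySem.List.pyGet? r j).getD 0

def vset (v : List (List Int)) (i j : Int) : List (List Int) :=
  v.modify i.toNat (fun row => row.set j.toNat 1)

def nbrA (maps : List String) (N M : Int) (c : Int × Int)
    (st : List (Int × Int) × List (List Int) × Int) (d : Int × Int) :
    List (Int × Int) × List (List Int) × Int :=
  if 0 ≤ c.1 + d.1 ∧ c.1 + d.1 < N ∧ 0 ≤ c.2 + d.2 ∧ c.2 + d.2 < M ∧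
      vget st.2.1 (c.1 + d.1) (c.2 + d.2) = 0 ∧ cellAt maps (c.1 + d.1) (c.2 + d.2) ≠ 'X' then
    (st.1 ++ [(c.1 + d.1, c.2 + d.2)], vset st.2.1 (c.1 + d.1) (c.2 + d.2),
      st.2.2 + dval (cellAt maps (c.1 + d.1) (c.2 + d.2)))
  else st

def bfsA (maps : List String) (N M : Int) :
    Nat → List (Int × Int) → List (List Int) → Int → List (List Int) × Int
  | 0, _, v, s => (v, s)
  | _ + 1, [], v, s => (v, s)
  | fuel + 1, c :: rest, v, s =>
    let st := [((-1 : Int), (0 : Int)), (1, 0), (0, -1), (0, 1)].foldl (nbrA maps N M c) (rest, v, s)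
    bfsA maps N M fuel st.1 st.2.1 st.2.2

def innerA (maps : List String) (N M : Int) (fuel : Nat) (i : Int)
    (st : List (List Int) × List Int) (j : Int) : List (List Int) × List Int :=
  if vget st.1 i j = 0 ∧ cellAt maps i j ≠ 'X' then
    let r := bfsA maps N M fuel [(i, j)] (vset st.1 i j) (dval (cellAt maps i j))
    (r.1, st.2 ++ [r.2])
  else st

def solution (maps : List String) : List Int :=
  let N : Int := maps.length
  let M : Int := (((PySem.List.pyGet? maps 0).getD "").toList.length : Int)
  let fuel : Nat := 2 * (N.toNat * M.toNat) + 1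
  let res := (PySem.List.pyRange 0 N 1).foldl
    (fun st i => (PySem.List.pyRange 0 M 1).foldl (innerA maps N M fuel i) st)
    (List.replicate N.toNat (List.replicate M.toNat (0 : Int)), ([] : List Int))
  if res.2.length = 0 then [-1] else PySem.List.sorted res.2 (fun x => x) false

-- ===== PORT B =====  (DFS flood fill: explicit stack popped at the back, one shared set of
-- visited coordinates, survival days added when a cell is popped)
def nbrB (maps : List String) (n m : Int)
    (st : List (Int × Int) × PySem.Set (Int × Int)) (p : Int × Int) :
    List (Int × Int) × PySem.Set (Int × Int) :=
  if 0 ≤ p.1 ∧ p.1 < n ∧ 0 ≤ p.2 ∧ p.2 < m ∧ ¬ p ∈ st.2 ∧ cellAt maps p.1 p.2 ≠ 'X' then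
    (st.1 ++ [p], PySem.Set.add st.2 p)
  else st

def dfsB (maps : List String) (n m : Int) :
    Nat → List (Int × Int) → PySem.Set (Int × Int) → Int → PySem.Set (Int × Int) × Int
  | 0, _, seen, total => (seen, total)
  | fuel + 1, stack, seen, total =>
    match PySem.List.pop? stack with
    | none => (seen, total)
    | some (c, rest) =>
      let st := [(c.1 - 1, c.2), (c.1 + 1, c.2), (c.1, c.2 - 1), (c.1, c.2 + 1)].foldl
        (nbrB maps n m) (rest, seen)
      dfsB maps n m fuel st.1 st.2 (total + dval (cellAt maps c.1 c.2))

def innerB (maps : List String) (n m : Int) (fuel : Nat) (i : Int)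
    (st : PySem.Set (Int × Int) × List Int) (j : Int) : PySem.Set (Int × Int) × List Int :=
  if (i, j) ∈ st.1 ∨ cellAt maps i j = 'X' then st
  else
    let r := dfsB maps n m fuel [(i, j)] (PySem.Set.add st.1 (i, j)) 0
    (r.1, st.2 ++ [r.2])

def solution_alt (maps : List String) : List Int :=
  let n : Int := maps.length
  let m : Int := (((PySem.List.pyGet? maps 0).getD "").toList.length : Int)
  let fuel : Nat := 2 * (n.toNat * m.toNat) + 1
  let res := (PySem.List.pyRange 0 n 1).foldl
    (fun st i => (PySem.List.pyRange 0 m 1).foldl (innerB maps n m fuel i) st)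
    ((PySem.Set.empty : PySem.Set (Int × Int)), ([] : List Int))
  if res.2.isEmpty then [-1] else PySem.List.sorted res.2 (fun x => x) false

-- ===== PRECONDITION & SPEC =====
-- Pre_ excludes exactly the inputs on which the Python A raises: empty maps (maps[0] is an
-- IndexError), a row shorter than the first row (IndexError in the scan), or a cell in the first
-- M columns that is neither 'X' nor a digit (int() ValueError on a land cell).
def pvPreRow (m : Nat) (s : String) : Bool :=
  decide (m ≤ s.toList.length) && (s.toList.take m).all (fun c => c == 'X' || ('0' ≤ c && c ≤ '9'))
def Pre_solution (maps : List String) : Prop :=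
  maps ≠ [] ∧ (maps.all (pvPreRow ((maps.headD "").toList.length))) = true
instance (maps : List String) : Decidable (Pre_solution maps) := by
  unfold Pre_solution; infer_instance

def pvWitness_solution : List String := ["X1X", "220"]

def Spec_solution (maps : List String) (out : List Int) : Prop := out = solution_alt maps
instance (maps : List String) (out : List Int) : Decidable (Spec_solution maps out) := by
  unfold Spec_solution; infer_instance

-- ===== CLAIM (what is proved, stated in full; the proofs are below) =====
def Claim_equal_solution : Prop :=
  ∀ (maps : List String), Dom_solution maps → Pre_solution maps → Spec_solution maps (solution maps)

-- ===== LEMMAS AND PROOFS =====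

lemma bool_eq_of_iff {a b : Bool} (h : a = true ↔ b = true) : a = b := by
  cases a <;> cases b <;> simp_all

-- generic: flipping one list element's Bool from false to true shifts the filtered sum by w p
lemma filter_sum_update {α : Type} [DecidableEq α] (w : α → Int) :
    ∀ (l : List α), l.Nodup → ∀ (p : α), p ∈ l → ∀ (f g : α → Bool), f p = false → g p = true →
      (∀ q ∈ l, q ≠ p → g q = f q) →
      ((l.filter g).map w).sum = ((l.filter f).map w).sum + w p := by
  intro l
  induction l with
  | nil => intro _ p hp; cases hp
  | cons a t ih =>
    intro hl p hp f g hfp hgp hag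
    rw [List.nodup_cons] at hl
    rcases List.mem_cons.1 hp with rfl | hp'
    · have ht : t.filter g = t.filter f :=
        List.filter_congr (fun q hq => hag q (List.mem_cons_of_mem _ hq) (fun h => hl.1 (h ▸ hq)))
    
      simp only [List.filter_cons, hgp, hfp, Bool.false_eq_true, not_false_eq_true,
        ite_true, ite_false, List.map_cons, List.sum_cons, ht]
      omega
    · have hap : a ≠ p := fun h => hl.1 (h ▸ hp')
      have hga : g a = f a := hag a (List.mem_cons_self) hap
      have hrec := ih hl.2 p hp' f g hfp hgp
        (fun q hq hqp => hag q (List.mem_cons_of_mem _ hq) hqp)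
      cases hfa : f a
      · rw [hfa] at hga
        simp only [List.filter_cons, hga, hfa, Bool.false_eq_true, ite_false, hrec]
      · rw [hfa] at hga
        simp only [List.filter_cons, hga, hfa, ite_true, List.map_cons, List.sum_cons, hrec]
        omega

lemma countP_flip {α : Type} [DecidableEq α] :
    ∀ (l : List α), l.Nodup → ∀ (p : α), p ∈ l → ∀ (f g : α → Bool), f p = false → g p = true →
      (∀ q ∈ l, q ≠ p → g q = f q) →
      l.countP (fun q => !g q) + 1 = l.countP (fun q => !f q) := by
  intro l
  induction l with
  | nil => intro _ p hp; cases hp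
  | cons a t ih =>
    intro hl p hp f g hfp hgp hag
    rw [List.nodup_cons] at hl
    rcases List.mem_cons.1 hp with rfl | hp'
    · have ht : t.countP (fun q => !g q) = t.countP (fun q => !f q) :=
        List.countP_congr (fun q hq => by
          rw [hag q (List.mem_cons_of_mem _ hq) (fun h => hl.1 (h ▸ hq))])
      simp [List.countP_cons, hgp, hfp, ht]
    · have hap : a ≠ p := fun h => hl.1 (h ▸ hp')
      have hga : g a = f a := hag a (List.mem_cons_self) hap
      have hrec := ih hl.2 p hp' f g hfp hgp
        (fun q hq hqp => hag q (List.mem_cons_of_mem _ hq) hqp)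
      simp only [List.countP_cons, hga]
      omega

-- grid vocabulary
def inB (N M : Int) (p : Int × Int) : Prop := 0 ≤ p.1 ∧ p.1 < N ∧ 0 ≤ p.2 ∧ p.2 < M

def Okp (maps : List String) (N M : Int) (p : Int × Int) : Prop :=
  inB N M p ∧ cellAt maps p.1 p.2 ≠ 'X'

def adjp (c r : Int × Int) : Prop :=
  r = (c.1 - 1, c.2) ∨ r = (c.1 + 1, c.2) ∨ r = (c.1, c.2 - 1) ∨ r = (c.1, c.2 + 1)

-- cells reachable from seed through land cells avoiding the already-visited region V
inductive Reach (maps : List String) (N M : Int) (V : Int × Int → Bool) (seed : Int × Int) :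
    Int × Int → Prop
  | base : Reach maps N M V seed seed
  | step {p r : Int × Int} : Reach maps N M V seed p → adjp p r → Okp maps N M r → V r = false →
      Reach maps N M V seed r

lemma reach_V_false {maps : List String} {N M : Int} {V : Int × Int → Bool} {seed p : Int × Int}
    (hseed : V seed = false) (h : Reach maps N M V seed p) : V p = false := by
  induction h with
  | base => exact hseed
  | step _ _ _ hv _ => exact hv

lemma reach_ok {maps : List String} {N M : Int} {V : Int × Int → Bool} {seed p : Int × Int}
    (hseed : Okp maps N M seed) (h : Reach maps N M V seed p) : Okp maps N M p := by
  induction h with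
  | base => exact hseed
  | step _ _ hok _ _ => exact hok

def cells (N M : Int) : List (Int × Int) :=
  (PySem.List.pyRange 0 N 1).flatMap fun i => (PySem.List.pyRange 0 M 1).map fun j => (i, j)

lemma mem_cells {N M : Int} {p : Int × Int} : p ∈ cells N M ↔ inB N M p := by
  unfold cells inB
  constructor
  · intro h
    rcases List.mem_flatMap.1 h with ⟨i, hi, hmem⟩
    rcases List.mem_map.1 hmem with ⟨j, hj, rfl⟩
    rw [PySem.List.mem_pyRange_one] at hi hj
    exact ⟨hi.1, hi.2, hj.1, hj.2⟩
  · intro ⟨h1, h2, h3, h4⟩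
    exact List.mem_flatMap.2 ⟨p.1, by rw [PySem.List.mem_pyRange_one]; exact ⟨h1, h2⟩,
      List.mem_map.2 ⟨p.2, by rw [PySem.List.mem_pyRange_one]; exact ⟨h3, h4⟩, rfl⟩⟩

lemma nodup_cells (N M : Int) : (cells N M).Nodup := by
  unfold cells
  rw [List.nodup_flatMap]
  refine ⟨fun i _ => ?_, ?_⟩
  · exact (PySem.List.nodup_pyRange_one 0 M).map (fun a b h => by
      have := congrArg Prod.snd h; simpa using this)
  · have hnd := PySem.List.nodup_pyRange_one 0 N
    refine List.Pairwise.imp ?_ hnd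
    intro a b hab x hxa hxb
    rcases List.mem_map.1 hxa with ⟨j, _, rfl⟩
    rcases List.mem_map.1 hxb with ⟨j', _, he⟩
    exact hab (by have := congrArg Prod.fst he; simpa using this.symm)

lemma length_cells (N M : Int) : (cells N M).length = N.toNat * M.toNat := by
  unfold cells
  rw [List.length_flatMap]
  have h1 : ∀ i ∈ PySem.List.pyRange 0 N 1,
      ((PySem.List.pyRange 0 M 1).map fun j => (i, j)).length = M.toNat := by
    intro i _
    rw [List.length_map, PySem.List.length_pyRange_one]
    simp
  rw [List.map_congr_left h1, List.map_const', List.sum_replicate, PySem.List.length_pyRange_one]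
  simp

def gridSum (maps : List String) (N M : Int) (f : Int × Int → Bool) : Int :=
  (((cells N M).filter f).map fun p => dval (cellAt maps p.1 p.2)).sum

def ucount (N M : Int) (f : Int × Int → Bool) : Nat :=
  (cells N M).countP fun p => !f p

lemma gridSum_congr {maps : List String} {N M : Int} {f g : Int × Int → Bool}
    (h : ∀ p ∈ cells N M, f p = g p) : gridSum maps N M f = gridSum maps N M g := by
  unfold gridSum; rw [List.filter_congr h]

lemma gridSum_false (maps : List String) (N M : Int) :
    gridSum maps N M (fun _ => false) = 0 := by
  simp [gridSum]

lemma gridSum_update {maps : List String} {N M : Int} {f g : Int × Int → Bool} {p : Int × Int}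
    (hp : inB N M p) (hfp : f p = false) (hgp : g p = true)
    (hag : ∀ q ∈ cells N M, q ≠ p → g q = f q) :
    gridSum maps N M g = gridSum maps N M f + dval (cellAt maps p.1 p.2) := by
  exact filter_sum_update _ (cells N M) (nodup_cells N M) p (mem_cells.2 hp) f g hfp hgp hag

lemma ucount_update {N M : Int} {f g : Int × Int → Bool} {p : Int × Int}
    (hp : inB N M p) (hfp : f p = false) (hgp : g p = true)
    (hag : ∀ q ∈ cells N M, q ≠ p → g q = f q) :
    ucount N M g + 1 = ucount N M f := by
  exact countP_flip (cells N M) (nodup_cells N M) p (mem_cells.2 hp) f g hfp hgp hag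

lemma ucount_le (N M : Int) (f : Int × Int → Bool) : ucount N M f ≤ N.toNat * M.toNat := by
  calc ucount N M f ≤ (cells N M).length := List.countP_le_length
  _ = N.toNat * M.toNat := length_cells N M

-- visited-matrix lemmas (A side)
def shapeV (N M : Int) (v : List (List Int)) : Prop :=
  v.length = N.toNat ∧ ∀ (k : Nat) (row : List Int), v[k]? = some row → row.length = M.toNat

def markedA (v : List (List Int)) (p : Int × Int) : Bool := vget v p.1 p.2 != 0

def markedB (seen : PySem.Set (Int × Int)) (p : Int × Int) : Bool := decide (p ∈ seen)

lemma vget_pos (v : List (List Int)) {i j : Int} (hi : 0 ≤ i) (hj : 0 ≤ j) :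
    vget v i j = (v[i.toNat]?.bind fun r => r[j.toNat]?).getD 0 := by
  unfold vget
  rw [PySem.List.pyGet?_of_nonneg v hi]
  cases h : v[i.toNat]? with
  | none => rfl
  | some r => simp [PySem.List.pyGet?_of_nonneg r hj]

lemma shapeV_replicate (N M : Int) :
    shapeV N M (List.replicate N.toNat (List.replicate M.toNat (0 : Int))) := by
  constructor
  · simp
  · intro k row hk
    rw [List.getElem?_replicate] at hk
    split at hk
    · cases hk; simp
    · cases hk

lemma shapeV_vset {N M : Int} {v : List (List Int)} (hsh : shapeV N M v) (i j : Int) :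
    shapeV N M (vset v i j) := by
  unfold vset
  constructor
  · rw [List.length_modify]; exact hsh.1
  · intro k row hk
    rw [List.getElem?_modify] at hk
    cases h : v[k]? with
    | none => rw [h] at hk; cases hk
    | some r =>
      rw [h] at hk
      have hk' : (if i.toNat = k then r.set j.toNat 1 else r) = row := by simpa using hk
      by_cases hik : i.toNat = k
      · rw [if_pos hik] at hk'
        rw [← hk', List.length_set]
        exact hsh.2 k r h
      · rw [if_neg hik] at hk'
        rw [← hk']
        exact hsh.2 k r h

lemma vget_replicate (N M : Int) (i j : Int) :
    vget (List.replicate N.toNat (List.replicate M.toNat (0 : Int))) i j = 0 := by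
  unfold vget
  cases h : PySem.List.pyGet? (List.replicate N.toNat (List.replicate M.toNat (0 : Int))) i with
  | none => rfl
  | some row =>
    have hrow := PySem.List.mem_of_pyGet?_eq_some _ h
    have : row = List.replicate M.toNat 0 := List.eq_of_mem_replicate hrow
    subst this
    have h2 : ∀ x : Int, PySem.List.pyGet? (List.replicate M.toNat (0 : Int)) j = some x → x = 0 :=
      fun x hx => List.eq_of_mem_replicate (PySem.List.mem_of_pyGet?_eq_some _ hx)
    cases hc : PySem.List.pyGet? (List.replicate M.toNat (0 : Int)) j with
    | none => simp [hc]
    | some x => simp [hc, h2 x hc]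

lemma vget_vset_self {N M : Int} {v : List (List Int)} (hsh : shapeV N M v) {i j : Int}
    (h : inB N M (i, j)) : vget (vset v i j) i j = 1 := by
  obtain ⟨h1, h2, h3, h4⟩ := h
  simp only at h1 h2 h3 h4
  have hiN : i.toNat < v.length := by rw [hsh.1]; omega
  have hv : v[i.toNat]? = some v[i.toNat] := List.getElem?_eq_getElem hiN
  have hrow : (v[i.toNat]).length = M.toNat := hsh.2 _ _ hv
  have hjl : j.toNat < (v[i.toNat]).length := by rw [hrow]; omega
  rw [vget_pos _ h1 h3]
  unfold vset
  rw [List.getElem?_modify, hv]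
  simp [List.getElem?_set, hjl]

lemma vget_vset_ne {N M : Int} {v : List (List Int)} {i j : Int} (hij : inB N M (i, j))
    {p : Int × Int} (hp : inB N M p) (hne : p ≠ (i, j)) :
    vget (vset v i j) p.1 p.2 = vget v p.1 p.2 := by
  obtain ⟨a1, a2, a3, a4⟩ := hij
  obtain ⟨b1, b2, b3, b4⟩ := hp
  simp only at a1 a2 a3 a4
  rw [vget_pos _ b1 b3, vget_pos _ b1 b3]
  unfold vset
  rw [List.getElem?_modify]
  by_cases hi : i.toNat = p.1.toNat
  · have hieq : i = p.1 := by omega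
    have hjne : j ≠ p.2 := by
      intro he
      exact hne (Prod.ext hieq.symm he.symm)
    have hjt : j.toNat ≠ p.2.toNat := by omega
    cases hv : v[p.1.toNat]? with
    | none => simp
    | some r => simp [hi, List.getElem?_set, hjt]
  · cases hv : v[p.1.toNat]? with
    | none => simp
    | some r => simp [hi]

lemma markedA_vset_self {N M : Int} {v : List (List Int)} (hsh : shapeV N M v) {i j : Int}
    (h : inB N M (i, j)) : markedA (vset v i j) (i, j) = true := by
  simp [markedA, vget_vset_self hsh h]

lemma markedA_vset_ne {N M : Int} {v : List (List Int)} {i j : Int} (hij : inB N M (i, j))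
    {p : Int × Int} (hp : inB N M p) (hne : p ≠ (i, j)) :
    markedA (vset v i j) p = markedA v p := by
  simp [markedA, vget_vset_ne hij hp hne]

lemma markedA_vset_mono {N M : Int} {v : List (List Int)} (hsh : shapeV N M v) {i j : Int}
    (hij : inB N M (i, j)) {p : Int × Int} (hp : inB N M p) (h : markedA v p = true) :
    markedA (vset v i j) p = true := by
  by_cases he : p = (i, j)
  · subst he; exact markedA_vset_self hsh hij
  · rw [markedA_vset_ne hij hp he]; exact h

lemma adjp_mem {c r : Int × Int} (h : adjp c r) :
    ∃ d ∈ ([((-1 : Int), (0 : Int)), (1, 0), (0, -1), (0, 1)] : List (Int × Int)),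
      r = (c.1 + d.1, c.2 + d.2) := by
  rcases h with rfl | rfl | rfl | rfl
  · exact ⟨(-1, 0), by simp, by simp; omega⟩
  · exact ⟨(1, 0), by simp, by simp⟩
  · exact ⟨(0, -1), by simp, by simp; omega⟩
  · exact ⟨(0, 1), by simp, by simp⟩

-- invariants of A's BFS loop
structure IA (maps : List String) (N M : Int) (V : Int × Int → Bool) (seed : Int × Int)
    (q : List (Int × Int)) (v : List (List Int)) : Prop where
  shape : shapeV N M v
  okSeed : Okp maps N M seed
  vSeed : V seed = false
  mSeed : markedA v seed = true
  qmem : ∀ p ∈ q, markedA v p = true ∧ Reach maps N M V seed p ∧ Okp maps N M p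
  sound : ∀ p, inB N M p → markedA v p = true → V p = true ∨ Reach maps N M V seed p
  closed : ∀ p, inB N M p → markedA v p = true → V p = false → p ∉ q →
      ∀ r, adjp p r → Okp maps N M r → markedA v r = true
  nod : q.Nodup
  vsub : ∀ p, inB N M p → V p = true → markedA v p = true

structure MA (maps : List String) (N M : Int) (V : Int × Int → Bool) (seed c : Int × Int)
    (q : List (Int × Int)) (v : List (List Int)) : Prop where
  shape : shapeV N M v
  okSeed : Okp maps N M seed
  vSeed : V seed = false
  mSeed : markedA v seed = true
  qmem : ∀ p ∈ q, markedA v p = true ∧ Reach maps N M V seed p ∧ Okp maps N M p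
  sound : ∀ p, inB N M p → markedA v p = true → V p = true ∨ Reach maps N M V seed p
  closed' : ∀ p, inB N M p → markedA v p = true → V p = false → p ∉ q → p ≠ c →
      ∀ r, adjp p r → Okp maps N M r → markedA v r = true
  nod : q.Nodup
  vsub : ∀ p, inB N M p → V p = true → markedA v p = true
  cMark : markedA v c = true
  cNot : c ∉ q
  cReach : Reach maps N M V seed c
  cOk : Okp maps N M c

lemma IA_pop {maps : List String} {N M : Int} {V : Int × Int → Bool} {seed c : Int × Int}
    {rest : List (Int × Int)} {v : List (List Int)} (h : IA maps N M V seed (c :: rest) v) :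
    MA maps N M V seed c rest v := by
  have hq := h.qmem c (List.mem_cons_self)
  have hnod := List.nodup_cons.1 h.nod
  exact {
    shape := h.shape, okSeed := h.okSeed, vSeed := h.vSeed, mSeed := h.mSeed
    qmem := fun p hp => h.qmem p (List.mem_cons_of_mem _ hp)
    sound := h.sound
    closed' := fun p h1 h2 h3 h4 h5 => h.closed p h1 h2 h3 (by
      rw [List.mem_cons]; rintro (rfl | hc); exact h5 rfl; exact h4 hc)
    nod := hnod.2
    vsub := h.vsub
    cMark := hq.1, cNot := hnod.1, cReach := hq.2.1, cOk := hq.2.2 }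

lemma IA_done {maps : List String} {N M : Int} {V : Int × Int → Bool} {seed : Int × Int}
    {v : List (List Int)} (h : IA maps N M V seed [] v) :
    ∀ p, inB N M p → (markedA v p = true ↔ (V p = true ∨ Reach maps N M V seed p)) := by
  have aux : ∀ p, Reach maps N M V seed p → markedA v p = true := by
    intro p hp
    induction hp with
    | base => exact h.mSeed
    | step hr hadj hok hv ih =>
      rename_i p' r'
      have hok' := reach_ok h.okSeed hr
      exact h.closed p' hok'.1 ih (reach_V_false h.vSeed hr) (List.not_mem_nil) r' hadj hok
  intro p hin
  constructor
  · exact h.sound p hin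
  · rintro (hv | hr)
    · exact h.vsub p hin hv
    · exact aux p hr

-- one neighbour probe of A preserves the mid-loop invariant
lemma nbrA_step {maps : List String} {N M : Int} {V : Int × Int → Bool} {seed c : Int × Int}
    (st : List (Int × Int) × List (List Int) × Int) (d : Int × Int)
    (hadj : adjp c (c.1 + d.1, c.2 + d.2)) (h : MA maps N M V seed c st.1 st.2.1) :
    MA maps N M V seed c (nbrA maps N M c st d).1 (nbrA maps N M c st d).2.1 ∧
    (∀ p, inB N M p → markedA st.2.1 p = true → markedA (nbrA maps N M c st d).2.1 p = true) ∧
    (Okp maps N M (c.1 + d.1, c.2 + d.2) →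
      markedA (nbrA maps N M c st d).2.1 (c.1 + d.1, c.2 + d.2) = true) ∧
    ((nbrA maps N M c st d).2.2 + gridSum maps N M (fun p => markedA st.2.1 p && !V p)
      = st.2.2 + gridSum maps N M (fun p => markedA (nbrA maps N M c st d).2.1 p && !V p)) ∧
    ((nbrA maps N M c st d).1.length + 2 * ucount N M (markedA (nbrA maps N M c st d).2.1)
      ≤ st.1.length + 2 * ucount N M (markedA st.2.1)) := by
  obtain ⟨q, v, s⟩ := st
  simp only at h ⊢
  by_cases hcond : 0 ≤ c.1 + d.1 ∧ c.1 + d.1 < N ∧ 0 ≤ c.2 + d.2 ∧ c.2 + d.2 < M ∧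
      vget v (c.1 + d.1) (c.2 + d.2) = 0 ∧ cellAt maps (c.1 + d.1) (c.2 + d.2) ≠ 'X'
  · obtain ⟨h1, h2, h3, h4, h5, h6⟩ := hcond
    have hres : nbrA maps N M c (q, v, s) d =
        (q ++ [(c.1 + d.1, c.2 + d.2)], vset v (c.1 + d.1) (c.2 + d.2),
          s + dval (cellAt maps (c.1 + d.1) (c.2 + d.2))) := by
      unfold nbrA
      rw [if_pos ⟨h1, h2, h3, h4, h5, h6⟩]
    rw [hres]
    simp only
    have hinw : inB N M (c.1 + d.1, c.2 + d.2) := ⟨h1, h2, h3, h4⟩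
    have hokw : Okp maps N M (c.1 + d.1, c.2 + d.2) := ⟨hinw, h6⟩
    have hmw : markedA v (c.1 + d.1, c.2 + d.2) = false := by simp [markedA, h5]
    have hVw : V (c.1 + d.1, c.2 + d.2) = false := by
      cases hv : V (c.1 + d.1, c.2 + d.2)
      · rfl
      · exact absurd (h.vsub _ hinw hv) (by simp [hmw])
    have hreachw : Reach maps N M V seed (c.1 + d.1, c.2 + d.2) :=
      Reach.step h.cReach hadj hokw hVw
    have hmono : ∀ p, inB N M p → markedA v p = true →
        markedA (vset v (c.1 + d.1) (c.2 + d.2)) p = true :=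
      fun p hp hm => markedA_vset_mono h.shape hinw hp hm
    have hself : markedA (vset v (c.1 + d.1) (c.2 + d.2)) (c.1 + d.1, c.2 + d.2) = true :=
      markedA_vset_self h.shape hinw
    have hothers : ∀ p, inB N M p → p ≠ (c.1 + d.1, c.2 + d.2) →
        markedA (vset v (c.1 + d.1) (c.2 + d.2)) p = markedA v p :=
      fun p hp hne => markedA_vset_ne hinw hp hne
    have hwq : (c.1 + d.1, c.2 + d.2) ∉ q := fun hin => by
      have := (h.qmem _ hin).1
      rw [hmw] at this
      cases this
    have hcw : c ≠ (c.1 + d.1, c.2 + d.2) := fun he => by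
      have := h.cMark
      rw [he, hmw] at this
      cases this
    refine ⟨?_, ?_, ?_, ?_, ?_⟩
    · exact {
        shape := shapeV_vset h.shape _ _
        okSeed := h.okSeed, vSeed := h.vSeed
        mSeed := hmono seed h.okSeed.1 h.mSeed
        qmem := by
          intro p hp
          rcases List.mem_append.1 hp with hp' | hp'
          · have hh := h.qmem p hp'
            exact ⟨hmono p hh.2.2.1 hh.1, hh.2.1, hh.2.2⟩
          · rw [List.mem_singleton.1 hp']
            exact ⟨hself, hreachw, hokw⟩
        sound := by
          intro p hp hm
          by_cases he : p = (c.1 + d.1, c.2 + d.2)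
          · subst he; exact Or.inr hreachw
          · rw [hothers p hp he] at hm
            exact h.sound p hp hm
        closed' := by
          intro p hp hm hv hnq hnc r hadr hokr
          have hpw : p ≠ (c.1 + d.1, c.2 + d.2) := fun he =>
            hnq (he ▸ List.mem_append.2 (Or.inr (List.mem_singleton.2 rfl)))
          rw [hothers p hp hpw] at hm
          have := h.closed' p hp hm hv (fun hin => hnq (List.mem_append.2 (Or.inl hin))) hnc
            r hadr hokr
          exact hmono r hokr.1 this
        nod := by
          rw [List.nodup_append]
          refine ⟨h.nod, List.nodup_singleton _, fun x hx y hy => ?_⟩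
          rw [List.mem_singleton] at hy
          subst hy
          exact fun he => hwq (he ▸ hx)
        vsub := fun p hp hv => hmono p hp (h.vsub p hp hv)
        cMark := hmono c h.cOk.1 h.cMark
        cNot := by
          rw [List.mem_append]
          rintro (hc | hc)
          · exact h.cNot hc
          · exact hcw (List.mem_singleton.1 hc)
        cReach := h.cReach, cOk := h.cOk }
    · exact hmono
    · intro _; exact hself
    · have hgs : gridSum maps N M (fun p => markedA (vset v (c.1 + d.1) (c.2 + d.2)) p && !V p)
          = gridSum maps N M (fun p => markedA v p && !V p)
            + dval (cellAt maps (c.1 + d.1, c.2 + d.2).1 (c.1 + d.1, c.2 + d.2).2) := by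
        apply gridSum_update hinw
        · simp [hmw]
        · simp [hself, hVw]
        · intro p hp hne
          rw [hothers p (mem_cells.1 hp) hne]
      simp only at hgs
      rw [hgs]
      omega
    · have hus : ucount N M (markedA (vset v (c.1 + d.1) (c.2 + d.2))) + 1
          = ucount N M (markedA v) := by
        apply ucount_update hinw hmw hself
        intro p hp hne
        exact hothers p (mem_cells.1 hp) hne
      rw [List.length_append]
      simp only [List.length_singleton]
      omega
  · have hres : nbrA maps N M c (q, v, s) d = (q, v, s) := by
      unfold nbrA
      rw [if_neg hcond]
    rw [hres]
    refine ⟨h, fun p _ hm => hm, ?_, rfl, le_refl _⟩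
    intro hok
    by_contra hm
    apply hcond
    refine ⟨hok.1.1, hok.1.2.1, hok.1.2.2.1, hok.1.2.2.2, ?_, hok.2⟩
    simpa [markedA] using hm

-- the whole 4-direction for-loop of A
lemma nbrA_fold {maps : List String} {N M : Int} {V : Int × Int → Bool} {seed c : Int × Int} :
    ∀ (ds : List (Int × Int)) (st : List (Int × Int) × List (List Int) × Int),
      (∀ d ∈ ds, adjp c (c.1 + d.1, c.2 + d.2)) → MA maps N M V seed c st.1 st.2.1 →
      MA maps N M V seed c (ds.foldl (nbrA maps N M c) st).1
        (ds.foldl (nbrA maps N M c) st).2.1 ∧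
      (∀ p, inB N M p → markedA st.2.1 p = true →
        markedA (ds.foldl (nbrA maps N M c) st).2.1 p = true) ∧
      (∀ d ∈ ds, Okp maps N M (c.1 + d.1, c.2 + d.2) →
        markedA (ds.foldl (nbrA maps N M c) st).2.1 (c.1 + d.1, c.2 + d.2) = true) ∧
      ((ds.foldl (nbrA maps N M c) st).2.2 + gridSum maps N M (fun p => markedA st.2.1 p && !V p)
        = st.2.2 + gridSum maps N M (fun p => markedA (ds.foldl (nbrA maps N M c) st).2.1 p && !V p)) ∧
      ((ds.foldl (nbrA maps N M c) st).1.length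
          + 2 * ucount N M (markedA (ds.foldl (nbrA maps N M c) st).2.1)
        ≤ st.1.length + 2 * ucount N M (markedA st.2.1)) := by
  intro ds
  induction ds with
  | nil =>
    intro st _ h
    exact ⟨h, fun p _ hm => hm, by simp, rfl, le_refl _⟩
  | cons d ds ih =>
    intro st hadj h
    have hd := hadj d (List.mem_cons_self)
    have hstep := nbrA_step st d hd h
    have hrec := ih (nbrA maps N M c st d) (fun d' hd' => hadj d' (List.mem_cons_of_mem _ hd'))
      hstep.1
    rw [List.foldl_cons]
    refine ⟨hrec.1, ?_, ?_, ?_, ?_⟩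
    · intro p hp hm
      exact hrec.2.1 p hp (hstep.2.1 p hp hm)
    · intro d' hd' hok
      rcases List.mem_cons.1 hd' with rfl | hd''
      · exact hrec.2.1 _ hok.1 (hstep.2.2.1 hok)
      · exact hrec.2.2.1 d' hd'' hok
    · have e1 := hstep.2.2.2.1
      have e2 := hrec.2.2.2.1
      omega
    · have e1 := hstep.2.2.2.2
      have e2 := hrec.2.2.2.2
      omega

-- A's BFS while-loop: with the invariant and enough fuel the visited region it ends with is
-- exactly V ∪ Reach, and the accumulated sum grows by the newly visited digits
lemma bfsA_spec {maps : List String} {N M : Int} {V : Int × Int → Bool} {seed : Int × Int} :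
    ∀ (fuel : Nat) (q : List (Int × Int)) (v : List (List Int)) (s : Int),
      IA maps N M V seed q v →
      q.length + 2 * ucount N M (markedA v) ≤ fuel →
      (∀ p, inB N M p → (markedA (bfsA maps N M fuel q v s).1 p = true ↔
          (V p = true ∨ Reach maps N M V seed p))) ∧
      shapeV N M (bfsA maps N M fuel q v s).1 ∧
      ((bfsA maps N M fuel q v s).2 + gridSum maps N M (fun p => markedA v p && !V p)
        = s + gridSum maps N M (fun p => markedA (bfsA maps N M fuel q v s).1 p && !V p)) := by
  intro fuel
  induction fuel with
  | zero =>
    intro q v s h hfuel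
    have hq : q = [] := by
      cases q with
      | nil => rfl
      | cons a t => simp at hfuel
    subst hq
    have hred : bfsA maps N M 0 [] v s = (v, s) := rfl
    rw [hred]
    exact ⟨IA_done h, h.shape, rfl⟩
  | succ fuel ih =>
    intro q v s h hfuel
    cases q with
    | nil =>
      have hred : bfsA maps N M (fuel + 1) [] v s = (v, s) := rfl
      rw [hred]
      exact ⟨IA_done h, h.shape, rfl⟩
    | cons c rest =>
      have hm := IA_pop h
      have hadjs : ∀ d ∈ ([((-1 : Int), (0 : Int)), (1, 0), (0, -1), (0, 1)] : List (Int × Int)),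
          adjp c (c.1 + d.1, c.2 + d.2) := by
        intro d hd
        rcases List.mem_cons.1 hd with rfl | hd
        · left; simp; omega
        rcases List.mem_cons.1 hd with rfl | hd
        · right; left; simp
        rcases List.mem_cons.1 hd with rfl | hd
        · right; right; left; simp; omega
        rcases List.mem_cons.1 hd with rfl | hd
        · right; right; right; simp
        · cases hd
      have hfold := nbrA_fold _ (rest, v, s) hadjs hm
      have hIA : IA maps N M V seed
          (([((-1 : Int), (0 : Int)), (1, 0), (0, -1), (0, 1)].foldl (nbrA maps N M c) (rest, v, s)).1)
          (([((-1 : Int), (0 : Int)), (1, 0), (0, -1), (0, 1)].foldl (nbrA maps N M c) (rest, v, s)).2.1) := by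
        have hma := hfold.1
        exact {
          shape := hma.shape, okSeed := hma.okSeed, vSeed := hma.vSeed, mSeed := hma.mSeed
          qmem := hma.qmem, sound := hma.sound
          closed := by
            intro p hp hmk hv hnq r hadr hokr
            by_cases he : p = c
            · subst he
              rcases adjp_mem hadr with ⟨d, hd, rfl⟩
              exact hfold.2.2.1 d hd hokr
            · exact hma.closed' p hp hmk hv hnq he r hadr hokr
          nod := hma.nod, vsub := hma.vsub }
      have hmeas : (([((-1 : Int), (0 : Int)), (1, 0), (0, -1), (0, 1)].foldl (nbrA maps N M c) (rest, v, s)).1.length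
          + 2 * ucount N M (markedA (([((-1 : Int), (0 : Int)), (1, 0), (0, -1), (0, 1)].foldl (nbrA maps N M c) (rest, v, s)).2.1)))
          ≤ rest.length + 2 * ucount N M (markedA v) := hfold.2.2.2.2
      have hih := ih _ _
        (([((-1 : Int), (0 : Int)), (1, 0), (0, -1), (0, 1)].foldl (nbrA maps N M c) (rest, v, s)).2.2)
        hIA (by simp only [List.length_cons] at hfuel; omega)
      have hred : bfsA maps N M (fuel + 1) (c :: rest) v s
          = bfsA maps N M fuel
            (([((-1 : Int), (0 : Int)), (1, 0), (0, -1), (0, 1)].foldl (nbrA maps N M c) (rest, v, s)).1)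
            (([((-1 : Int), (0 : Int)), (1, 0), (0, -1), (0, 1)].foldl (nbrA maps N M c) (rest, v, s)).2.1)
            (([((-1 : Int), (0 : Int)), (1, 0), (0, -1), (0, 1)].foldl (nbrA maps N M c) (rest, v, s)).2.2) := rfl
      rw [hred]
      refine ⟨hih.1, hih.2.1, ?_⟩
      have e1 : (([((-1 : Int), (0 : Int)), (1, 0), (0, -1), (0, 1)].foldl (nbrA maps N M c) (rest, v, s)).2.2)
          + gridSum maps N M (fun p => markedA v p && !V p)
          = s + gridSum maps N M (fun p =>
              markedA (([((-1 : Int), (0 : Int)), (1, 0), (0, -1), (0, 1)].foldl (nbrA maps N M c) (rest, v, s)).2.1) p && !V p) :=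
        hfold.2.2.2.1
      have e2 := hih.2.2
      omega

-- ===== B-side invariants and flood-fill lemma =====
structure IB (maps : List String) (N M : Int) (V : Int × Int → Bool) (seed : Int × Int)
    (stack : List (Int × Int)) (seen : PySem.Set (Int × Int)) : Prop where
  okSeed : Okp maps N M seed
  vSeed : V seed = false
  mSeed : markedB seen seed = true
  qmem : ∀ p ∈ stack, markedB seen p = true ∧ Reach maps N M V seed p ∧ Okp maps N M p
  sound : ∀ p, inB N M p → markedB seen p = true → V p = true ∨ Reach maps N M V seed p
  closed : ∀ p, inB N M p → markedB seen p = true → V p = false → p ∉ stack →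
      ∀ r, adjp p r → Okp maps N M r → markedB seen r = true
  nod : stack.Nodup
  vsub : ∀ p, inB N M p → V p = true → markedB seen p = true

structure MB (maps : List String) (N M : Int) (V : Int × Int → Bool) (seed c : Int × Int)
    (stack : List (Int × Int)) (seen : PySem.Set (Int × Int)) : Prop where
  okSeed : Okp maps N M seed
  vSeed : V seed = false
  mSeed : markedB seen seed = true
  qmem : ∀ p ∈ stack, markedB seen p = true ∧ Reach maps N M V seed p ∧ Okp maps N M p
  sound : ∀ p, inB N M p → markedB seen p = true → V p = true ∨ Reach maps N M V seed p
  closed' : ∀ p, inB N M p → markedB seen p = true → V p = false → p ∉ stack → p ≠ c →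
      ∀ r, adjp p r → Okp maps N M r → markedB seen r = true
  nod : stack.Nodup
  vsub : ∀ p, inB N M p → V p = true → markedB seen p = true
  cMark : markedB seen c = true
  cNot : c ∉ stack
  cReach : Reach maps N M V seed c
  cOk : Okp maps N M c

lemma IB_pop {maps : List String} {N M : Int} {V : Int × Int → Bool} {seed c : Int × Int}
    {rest : List (Int × Int)} {seen : PySem.Set (Int × Int)}
    (h : IB maps N M V seed (rest ++ [c]) seen) : MB maps N M V seed c rest seen := by
  have hq := h.qmem c (List.mem_append.2 (Or.inr (List.mem_singleton.2 rfl)))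
  have hnod : rest.Nodup ∧ c ∉ rest := by
    have := h.nod
    rw [List.nodup_append] at this
    exact ⟨this.1, fun hc => (this.2.2 c hc c (List.mem_singleton.2 rfl)) rfl⟩
  exact {
    okSeed := h.okSeed, vSeed := h.vSeed, mSeed := h.mSeed
    qmem := fun p hp => h.qmem p (List.mem_append.2 (Or.inl hp))
    sound := h.sound
    closed' := fun p h1 h2 h3 h4 h5 => h.closed p h1 h2 h3 (by
      rw [List.mem_append]
      rintro (hc | hc)
      · exact h4 hc
      · exact h5 (List.mem_singleton.1 hc))
    nod := hnod.1
    vsub := h.vsub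
    cMark := hq.1, cNot := hnod.2, cReach := hq.2.1, cOk := hq.2.2 }

lemma IB_done {maps : List String} {N M : Int} {V : Int × Int → Bool} {seed : Int × Int}
    {seen : PySem.Set (Int × Int)} (h : IB maps N M V seed [] seen) :
    ∀ p, inB N M p → (markedB seen p = true ↔ (V p = true ∨ Reach maps N M V seed p)) := by
  have aux : ∀ p, Reach maps N M V seed p → markedB seen p = true := by
    intro p hp
    induction hp with
    | base => exact h.mSeed
    | step hr hadj hok hv ih =>
      rename_i p' r'
      have hok' := reach_ok h.okSeed hr
      exact h.closed p' hok'.1 ih (reach_V_false h.vSeed hr) (List.not_mem_nil) r' hadj hok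
  intro p hin
  constructor
  · exact h.sound p hin
  · rintro (hv | hr)
    · exact h.vsub p hin hv
    · exact aux p hr

lemma markedB_add_self (seen : PySem.Set (Int × Int)) (w : Int × Int) :
    markedB (PySem.Set.add seen w) w = true := by
  simp [markedB, PySem.Set.mem_add]

lemma markedB_add_ne {seen : PySem.Set (Int × Int)} {w p : Int × Int} (h : p ≠ w) :
    markedB (PySem.Set.add seen w) p = markedB seen p := by
  simp [markedB, PySem.Set.mem_add, h]

lemma markedB_add_mono {seen : PySem.Set (Int × Int)} {w p : Int × Int}
    (h : markedB seen p = true) : markedB (PySem.Set.add seen w) p = true := by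
  simp only [markedB, decide_eq_true_eq] at h ⊢
  rw [PySem.Set.mem_add]
  exact Or.inl h

-- one neighbour probe of B: invariant preserved, pending-sum indicator unchanged
lemma nbrB_step {maps : List String} {N M : Int} {V : Int × Int → Bool} {seed c : Int × Int}
    (st : List (Int × Int) × PySem.Set (Int × Int)) (w : Int × Int)
    (hadj : adjp c w) (h : MB maps N M V seed c st.1 st.2) :
    MB maps N M V seed c (nbrB maps N M st w).1 (nbrB maps N M st w).2 ∧
    (∀ p, markedB st.2 p = true → markedB (nbrB maps N M st w).2 p = true) ∧
    (Okp maps N M w → markedB (nbrB maps N M st w).2 w = true) ∧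
    (∀ p, (markedB (nbrB maps N M st w).2 p && !V p && !(decide (p ∈ (nbrB maps N M st w).1)))
      = (markedB st.2 p && !V p && !(decide (p ∈ st.1)))) ∧
    ((nbrB maps N M st w).1.length + 2 * ucount N M (markedB (nbrB maps N M st w).2)
      ≤ st.1.length + 2 * ucount N M (markedB st.2)) := by
  obtain ⟨stack, seen⟩ := st
  simp only at h ⊢
  by_cases hcond : 0 ≤ w.1 ∧ w.1 < N ∧ 0 ≤ w.2 ∧ w.2 < M ∧ ¬ w ∈ seen ∧ cellAt maps w.1 w.2 ≠ 'X'
  · obtain ⟨h1, h2, h3, h4, h5, h6⟩ := hcond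
    have hres : nbrB maps N M (stack, seen) w = (stack ++ [w], PySem.Set.add seen w) := by
      unfold nbrB
      rw [if_pos ⟨h1, h2, h3, h4, h5, h6⟩]
    rw [hres]
    simp only
    have hinw : inB N M w := ⟨h1, h2, h3, h4⟩
    have hokw : Okp maps N M w := ⟨hinw, h6⟩
    have hmw : markedB seen w = false := by simp [markedB, h5]
    have hVw : V w = false := by
      cases hv : V w
      · rfl
      · exact absurd (h.vsub w hinw hv) (by simp [hmw])
    have hreachw : Reach maps N M V seed w := Reach.step h.cReach hadj hokw hVw
    have hwq : w ∉ stack := fun hin => by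
      have := (h.qmem w hin).1
      rw [hmw] at this
      cases this
    have hcw : c ≠ w := fun he => by
      have := h.cMark
      rw [he, hmw] at this
      cases this
    refine ⟨?_, ?_, ?_, ?_, ?_⟩
    · exact {
        okSeed := h.okSeed, vSeed := h.vSeed
        mSeed := markedB_add_mono h.mSeed
        qmem := by
          intro p hp
          rcases List.mem_append.1 hp with hp' | hp'
          · have hh := h.qmem p hp'
            exact ⟨markedB_add_mono hh.1, hh.2.1, hh.2.2⟩
          · rw [List.mem_singleton.1 hp']
            exact ⟨markedB_add_self seen w, hreachw, hokw⟩
        sound := by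
          intro p hp hm
          by_cases he : p = w
          · subst he; exact Or.inr hreachw
          · rw [markedB_add_ne he] at hm
            exact h.sound p hp hm
        closed' := by
          intro p hp hm hv hnq hnc r hadr hokr
          have hpw : p ≠ w := fun he =>
            hnq (he ▸ List.mem_append.2 (Or.inr (List.mem_singleton.2 rfl)))
          rw [markedB_add_ne hpw] at hm
          have := h.closed' p hp hm hv (fun hin => hnq (List.mem_append.2 (Or.inl hin))) hnc
            r hadr hokr
          exact markedB_add_mono this
        nod := by
          rw [List.nodup_append]
          refine ⟨h.nod, List.nodup_singleton _, fun x hx y hy => ?_⟩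
          rw [List.mem_singleton] at hy
          subst hy
          exact fun he => hwq (he ▸ hx)
        vsub := fun p hp hv => markedB_add_mono (h.vsub p hp hv)
        cMark := markedB_add_mono h.cMark
        cNot := by
          rw [List.mem_append]
          rintro (hc | hc)
          · exact h.cNot hc
          · exact hcw (List.mem_singleton.1 hc)
        cReach := h.cReach, cOk := h.cOk }
    · exact fun p hm => markedB_add_mono hm
    · intro _; exact markedB_add_self seen w
    · intro p
      by_cases he : p = w
      · subst he
        simp [markedB_add_self, hmw]
      · rw [markedB_add_ne he]
        have hmm : (decide (p ∈ stack ++ [w])) = (decide (p ∈ stack)) := by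
          simp [List.mem_append, he]
        rw [hmm]
    · have hus : ucount N M (markedB (PySem.Set.add seen w)) + 1 = ucount N M (markedB seen) := by
        apply ucount_update hinw hmw (markedB_add_self seen w)
        intro p _ hne
        exact markedB_add_ne hne
      rw [List.length_append]
      simp only [List.length_singleton]
      omega
  · have hres : nbrB maps N M (stack, seen) w = (stack, seen) := by
      unfold nbrB
      rw [if_neg hcond]
    rw [hres]
    refine ⟨h, fun p hm => hm, ?_, fun p => rfl, le_refl _⟩
    intro hok
    by_contra hm
    apply hcond
    refine ⟨hok.1.1, hok.1.2.1, hok.1.2.2.1, hok.1.2.2.2, ?_, hok.2⟩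
    intro hmem
    exact hm (by simp [markedB, hmem])

lemma nbrB_fold {maps : List String} {N M : Int} {V : Int × Int → Bool} {seed c : Int × Int} :
    ∀ (ws : List (Int × Int)) (st : List (Int × Int) × PySem.Set (Int × Int)),
      (∀ w ∈ ws, adjp c w) → MB maps N M V seed c st.1 st.2 →
      MB maps N M V seed c (ws.foldl (nbrB maps N M) st).1 (ws.foldl (nbrB maps N M) st).2 ∧
      (∀ p, markedB st.2 p = true → markedB (ws.foldl (nbrB maps N M) st).2 p = true) ∧
      (∀ w ∈ ws, Okp maps N M w → markedB (ws.foldl (nbrB maps N M) st).2 w = true) ∧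
      (∀ p, (markedB (ws.foldl (nbrB maps N M) st).2 p && !V p
          && !(decide (p ∈ (ws.foldl (nbrB maps N M) st).1)))
        = (markedB st.2 p && !V p && !(decide (p ∈ st.1)))) ∧
      ((ws.foldl (nbrB maps N M) st).1.length
          + 2 * ucount N M (markedB (ws.foldl (nbrB maps N M) st).2)
        ≤ st.1.length + 2 * ucount N M (markedB st.2)) := by
  intro ws
  induction ws with
  | nil =>
    intro st _ h
    exact ⟨h, fun p hm => hm, by simp, fun p => rfl, le_refl _⟩
  | cons w ws ih =>
    intro st hadj h
    have hw := hadj w (List.mem_cons_self)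
    have hstep := nbrB_step st w hw h
    have hrec := ih (nbrB maps N M st w) (fun w' hw' => hadj w' (List.mem_cons_of_mem _ hw'))
      hstep.1
    rw [List.foldl_cons]
    refine ⟨hrec.1, ?_, ?_, ?_, ?_⟩
    · intro p hm
      exact hrec.2.1 p (hstep.2.1 p hm)
    · intro w' hw' hok
      rcases List.mem_cons.1 hw' with rfl | hw''
      · exact hrec.2.1 _ (hstep.2.2.1 hok)
      · exact hrec.2.2.1 w' hw'' hok
    · intro p
      rw [hrec.2.2.2.1 p, hstep.2.2.2.1 p]
    · have e1 := hstep.2.2.2.2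
      have e2 := hrec.2.2.2.2
      omega

lemma dfsB_spec {maps : List String} {N M : Int} {V : Int × Int → Bool} {seed : Int × Int} :
    ∀ (fuel : Nat) (stack : List (Int × Int)) (seen : PySem.Set (Int × Int)) (s : Int),
      IB maps N M V seed stack seen →
      stack.length + 2 * ucount N M (markedB seen) ≤ fuel →
      (∀ p, inB N M p → (markedB (dfsB maps N M fuel stack seen s).1 p = true ↔
          (V p = true ∨ Reach maps N M V seed p))) ∧
      ((dfsB maps N M fuel stack seen s).2
          + gridSum maps N M (fun p => markedB seen p && !V p && !(decide (p ∈ stack)))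
        = s + gridSum maps N M (fun p => markedB (dfsB maps N M fuel stack seen s).1 p && !V p)) := by
  intro fuel
  induction fuel with
  | zero =>
    intro stack seen s h hfuel
    have hq : stack = [] := by
      cases stack with
      | nil => rfl
      | cons a t => simp at hfuel
    subst hq
    have hred : dfsB maps N M 0 [] seen s = (seen, s) := rfl
    rw [hred]
    refine ⟨IB_done h, ?_⟩
    have hcong : ∀ p ∈ cells N M,
        (markedB seen p && !V p && !(decide (p ∈ ([] : List (Int × Int)))))
          = (markedB seen p && !V p) := by
      intro p _; simp
    rw [gridSum_congr hcong]
  | succ fuel ih =>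
    intro stack seen s h hfuel
    rcases List.eq_nil_or_concat stack with rfl | ⟨rest, c, hstack⟩
    · have hred : dfsB maps N M (fuel + 1) [] seen s = (seen, s) := rfl
      rw [hred]
      refine ⟨IB_done h, ?_⟩
      have hcong : ∀ p ∈ cells N M,
          (markedB seen p && !V p && !(decide (p ∈ ([] : List (Int × Int)))))
            = (markedB seen p && !V p) := by
        intro p _; simp
      rw [gridSum_congr hcong]
    · rw [List.concat_eq_append] at hstack
      subst hstack
      have hmb := IB_pop h
      have hadjs : ∀ w ∈ [(c.1 - 1, c.2), (c.1 + 1, c.2), (c.1, c.2 - 1), (c.1, c.2 + 1)],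
          adjp c w := by
        intro w hw
        rcases List.mem_cons.1 hw with rfl | hw
        · left; rfl
        rcases List.mem_cons.1 hw with rfl | hw
        · right; left; rfl
        rcases List.mem_cons.1 hw with rfl | hw
        · right; right; left; rfl
        rcases List.mem_cons.1 hw with rfl | hw
        · right; right; right; rfl
        · cases hw
      have hfold := nbrB_fold [(c.1 - 1, c.2), (c.1 + 1, c.2), (c.1, c.2 - 1), (c.1, c.2 + 1)]
        (rest, seen) hadjs hmb
      have hma := hfold.1
      have hIB : IB maps N M V seed
          (([(c.1 - 1, c.2), (c.1 + 1, c.2), (c.1, c.2 - 1), (c.1, c.2 + 1)].foldl (nbrB maps N M) (rest, seen)).1)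
          (([(c.1 - 1, c.2), (c.1 + 1, c.2), (c.1, c.2 - 1), (c.1, c.2 + 1)].foldl (nbrB maps N M) (rest, seen)).2) := by
        exact {
          okSeed := hma.okSeed, vSeed := hma.vSeed, mSeed := hma.mSeed
          qmem := hma.qmem, sound := hma.sound
          closed := by
            intro p hp hmk hv hnq r hadr hokr
            by_cases he : p = c
            · subst he
              rcases hadr with rfl | rfl | rfl | rfl
              · exact hfold.2.2.1 _ (by simp) hokr
              · exact hfold.2.2.1 _ (by simp) hokr
              · exact hfold.2.2.1 _ (by simp) hokr
              · exact hfold.2.2.1 _ (by simp) hokr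
            · exact hma.closed' p hp hmk hv hnq he r hadr hokr
          nod := hma.nod, vsub := hma.vsub }
      have hmeas : (([(c.1 - 1, c.2), (c.1 + 1, c.2), (c.1, c.2 - 1), (c.1, c.2 + 1)].foldl (nbrB maps N M) (rest, seen)).1.length
          + 2 * ucount N M (markedB (([(c.1 - 1, c.2), (c.1 + 1, c.2), (c.1, c.2 - 1), (c.1, c.2 + 1)].foldl (nbrB maps N M) (rest, seen)).2)))
          ≤ rest.length + 2 * ucount N M (markedB seen) := hfold.2.2.2.2
      have hih := ih _ _ (s + dval (cellAt maps c.1 c.2)) hIB (by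
        rw [List.length_append] at hfuel
        simp only [List.length_singleton] at hfuel
        omega)
      have hred : dfsB maps N M (fuel + 1) (rest ++ [c]) seen s
          = dfsB maps N M fuel
            (([(c.1 - 1, c.2), (c.1 + 1, c.2), (c.1, c.2 - 1), (c.1, c.2 + 1)].foldl (nbrB maps N M) (rest, seen)).1)
            (([(c.1 - 1, c.2), (c.1 + 1, c.2), (c.1, c.2 - 1), (c.1, c.2 + 1)].foldl (nbrB maps N M) (rest, seen)).2)
            (s + dval (cellAt maps c.1 c.2)) := by
        rw [dfsB, PySem.List.pop?_last]
      rw [hred]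
      refine ⟨hih.1, ?_⟩
      have hcV : V c = false := reach_V_false h.vSeed hmb.cReach
      have hGpop : gridSum maps N M (fun p => markedB seen p && !V p && !(decide (p ∈ rest)))
          = gridSum maps N M (fun p => markedB seen p && !V p && !(decide (p ∈ rest ++ [c])))
            + dval (cellAt maps c.1 c.2) := by
        apply gridSum_update hmb.cOk.1
        · simp [List.mem_append]
        · simp [hmb.cMark, hcV, hmb.cNot]
        · intro q _ hne
          have hmm : (decide (q ∈ rest ++ [c])) = (decide (q ∈ rest)) := by
            simp [List.mem_append, hne]
          rw [hmm]
      have hGfold : gridSum maps N M (fun p =>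
            markedB (([(c.1 - 1, c.2), (c.1 + 1, c.2), (c.1, c.2 - 1), (c.1, c.2 + 1)].foldl (nbrB maps N M) (rest, seen)).2) p && !V p
            && !(decide (p ∈ ([(c.1 - 1, c.2), (c.1 + 1, c.2), (c.1, c.2 - 1), (c.1, c.2 + 1)].foldl (nbrB maps N M) (rest, seen)).1)))
          = gridSum maps N M (fun p => markedB seen p && !V p && !(decide (p ∈ rest))) :=
        gridSum_congr (fun p _ => hfold.2.2.2.1 p)
      have e2 := hih.2
      rw [hGfold, hGpop] at e2
      omega

-- ===== outer double loop: A and B stay pointwise equal =====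
def RelAB (maps : List String) (N M : Int) (stA : List (List Int) × List Int)
    (stB : PySem.Set (Int × Int) × List Int) : Prop :=
  shapeV N M stA.1 ∧ (∀ p, inB N M p → markedA stA.1 p = markedB stB.1 p) ∧ stA.2 = stB.2

lemma inner_step {maps : List String} {N M : Int} {fuel : Nat}
    (hfuel : fuel = 2 * (N.toNat * M.toNat) + 1) {i j : Int}
    (hi : 0 ≤ i ∧ i < N) (hj : 0 ≤ j ∧ j < M)
    (stA : List (List Int) × List Int) (stB : PySem.Set (Int × Int) × List Int)
    (h : RelAB maps N M stA stB) :
    RelAB maps N M (innerA maps N M fuel i stA j) (innerB maps N M fuel i stB j) := by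
  obtain ⟨hsh, hmk, hans⟩ := h
  have hinseed : inB N M (i, j) := ⟨hi.1, hi.2, hj.1, hj.2⟩
  by_cases hc : vget stA.1 i j = 0 ∧ cellAt maps i j ≠ 'X'
  · obtain ⟨hv0, hland⟩ := hc
    have hVseed : markedA stA.1 (i, j) = false := by simp [markedA, hv0]
    have hBm : markedB stB.1 (i, j) = false := by rw [← hmk _ hinseed]; exact hVseed
    have hnotin : (i, j) ∉ stB.1 := by simpa [markedB] using hBm
    have hA : innerA maps N M fuel i stA j =
        ((bfsA maps N M fuel [(i, j)] (vset stA.1 i j) (dval (cellAt maps i j))).1,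
         stA.2 ++ [(bfsA maps N M fuel [(i, j)] (vset stA.1 i j) (dval (cellAt maps i j))).2]) := by
      unfold innerA
      rw [if_pos ⟨hv0, hland⟩]
    have hB : innerB maps N M fuel i stB j =
        ((dfsB maps N M fuel [(i, j)] (PySem.Set.add stB.1 (i, j)) 0).1,
         stB.2 ++ [(dfsB maps N M fuel [(i, j)] (PySem.Set.add stB.1 (i, j)) 0).2]) := by
      unfold innerB
      rw [if_neg (by push_neg; exact ⟨hnotin, hland⟩)]
    rw [hA, hB]
    have hok : Okp maps N M (i, j) := ⟨hinseed, hland⟩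
    have hIA : IA maps N M (markedA stA.1) (i, j) [(i, j)] (vset stA.1 i j) := {
      shape := shapeV_vset hsh i j
      okSeed := hok
      vSeed := hVseed
      mSeed := markedA_vset_self hsh hinseed
      qmem := by
        intro p hp
        rw [List.mem_singleton.1 hp]
        exact ⟨markedA_vset_self hsh hinseed, Reach.base, hok⟩
      sound := by
        intro p hp hm
        by_cases he : p = (i, j)
        · subst he; exact Or.inr Reach.base
        · rw [markedA_vset_ne hinseed hp he] at hm
          exact Or.inl hm
      closed := by
        intro p hp hm hv hnq r hadr hokr
        exfalso
        have he : p ≠ (i, j) := fun e => hnq (e ▸ List.mem_singleton.2 rfl)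
        rw [markedA_vset_ne hinseed hp he] at hm
        simp [hm] at hv
      nod := List.nodup_singleton _
      vsub := fun p hp hv => markedA_vset_mono hsh hinseed hp hv }
    have hIB : IB maps N M (markedA stA.1) (i, j) [(i, j)] (PySem.Set.add stB.1 (i, j)) := {
      okSeed := hok
      vSeed := hVseed
      mSeed := markedB_add_self _ _
      qmem := by
        intro p hp
        rw [List.mem_singleton.1 hp]
        exact ⟨markedB_add_self _ _, Reach.base, hok⟩
      sound := by
        intro p hp hm
        by_cases he : p = (i, j)
        · subst he; exact Or.inr Reach.base
        · rw [markedB_add_ne he, ← hmk p hp] at hm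
          exact Or.inl hm
      closed := by
        intro p hp hm hv hnq r hadr hokr
        exfalso
        have he : p ≠ (i, j) := fun e => hnq (e ▸ List.mem_singleton.2 rfl)
        rw [markedB_add_ne he, ← hmk p hp] at hm
        simp [hm] at hv
      nod := List.nodup_singleton _
      vsub := by
        intro p hp hv
        rw [hmk p hp] at hv
        exact markedB_add_mono hv }
    have hmeasA : ([((i : Int), (j : Int))] : List (Int × Int)).length
        + 2 * ucount N M (markedA (vset stA.1 i j)) ≤ fuel := by
      have := ucount_le N M (markedA (vset stA.1 i j))
      simp only [List.length_singleton]
      omega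
    have hmeasB : ([((i : Int), (j : Int))] : List (Int × Int)).length
        + 2 * ucount N M (markedB (PySem.Set.add stB.1 (i, j))) ≤ fuel := by
      have := ucount_le N M (markedB (PySem.Set.add stB.1 (i, j)))
      simp only [List.length_singleton]
      omega
    have hA' := bfsA_spec fuel [(i, j)] (vset stA.1 i j) (dval (cellAt maps i j)) hIA hmeasA
    have hB' := dfsB_spec fuel [(i, j)] (PySem.Set.add stB.1 (i, j)) 0 hIB hmeasB
    refine ⟨hA'.2.1, ?_, ?_⟩
    · intro p hp
      exact bool_eq_of_iff ((hA'.1 p hp).trans (hB'.1 p hp).symm)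
    · have hGA : gridSum maps N M (fun p => markedA (vset stA.1 i j) p && !(markedA stA.1 p))
          = gridSum maps N M (fun _ => false) + dval (cellAt maps (i, j).1 (i, j).2) := by
        apply gridSum_update hinseed rfl
        · simp [markedA_vset_self hsh hinseed, hVseed]
        · intro q hq hne
          rw [markedA_vset_ne hinseed (mem_cells.1 hq) hne]
          simp
      have hGB : gridSum maps N M (fun p => markedB (PySem.Set.add stB.1 (i, j)) p
            && !(markedA stA.1 p) && !(decide (p ∈ ([(i, j)] : List (Int × Int)))))
          = gridSum maps N M (fun _ => false) := by
        apply gridSum_congr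
        intro p hp
        by_cases he : p = (i, j)
        · subst he; simp
        · rw [markedB_add_ne he, ← hmk p (mem_cells.1 hp)]
          simp
      have hGfin : gridSum maps N M (fun p =>
            markedA (bfsA maps N M fuel [(i, j)] (vset stA.1 i j) (dval (cellAt maps i j))).1 p
              && !(markedA stA.1 p))
          = gridSum maps N M (fun p =>
            markedB (dfsB maps N M fuel [(i, j)] (PySem.Set.add stB.1 (i, j)) 0).1 p
              && !(markedA stA.1 p)) := by
        apply gridSum_congr
        intro p hp
        have hiff := hA'.1 p (mem_cells.1 hp)
        have hiff2 := hB'.1 p (mem_cells.1 hp)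
        rw [bool_eq_of_iff (hiff.trans hiff2.symm)]
      have e1 := hA'.2.2
      have e2 := hB'.2
      rw [hGB] at e2
      rw [hGA] at e1
      rw [gridSum_false] at e1 e2
      simp only at e1
      have hsum : (bfsA maps N M fuel [(i, j)] (vset stA.1 i j) (dval (cellAt maps i j))).2
          = (dfsB maps N M fuel [(i, j)] (PySem.Set.add stB.1 (i, j)) 0).2 := by
        rw [hGfin] at e1
        omega
      simp only
      rw [hans, hsum]
  · have hA : innerA maps N M fuel i stA j = stA := by
      unfold innerA
      rw [if_neg hc]
    have hBc : (i, j) ∈ stB.1 ∨ cellAt maps i j = 'X' := by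
      rcases not_and_or.1 hc with h1 | h2
      · left
        have hm : markedA stA.1 (i, j) = true := by simp [markedA, bne_iff_ne, h1]
        rw [hmk _ hinseed] at hm
        simpa [markedB] using hm
      · right
        exact not_not.1 h2
    have hB : innerB maps N M fuel i stB j = stB := by
      unfold innerB
      rw [if_pos hBc]
    rw [hA, hB]
    exact ⟨hsh, hmk, hans⟩

lemma fold_inner {maps : List String} {N M : Int} {fuel : Nat}
    (hfuel : fuel = 2 * (N.toNat * M.toNat) + 1) {i : Int} (hi : 0 ≤ i ∧ i < N) :
    ∀ (js : List Int), (∀ j ∈ js, 0 ≤ j ∧ j < M) →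
      ∀ stA stB, RelAB maps N M stA stB →
      RelAB maps N M (js.foldl (innerA maps N M fuel i) stA) (js.foldl (innerB maps N M fuel i) stB) := by
  intro js
  induction js with
  | nil => intro _ stA stB h; exact h
  | cons j js ih =>
    intro hjs stA stB h
    rw [List.foldl_cons, List.foldl_cons]
    exact ih (fun j' hj' => hjs j' (List.mem_cons_of_mem _ hj'))
      _ _ (inner_step hfuel hi (hjs j (List.mem_cons_self)) stA stB h)

lemma fold_outer {maps : List String} {N M : Int} {fuel : Nat}
    (hfuel : fuel = 2 * (N.toNat * M.toNat) + 1) :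
    ∀ (is : List Int), (∀ i ∈ is, 0 ≤ i ∧ i < N) →
      ∀ stA stB, RelAB maps N M stA stB →
      RelAB maps N M
        (is.foldl (fun st i => (PySem.List.pyRange 0 M 1).foldl (innerA maps N M fuel i) st) stA)
        (is.foldl (fun st i => (PySem.List.pyRange 0 M 1).foldl (innerB maps N M fuel i) st) stB) := by
  intro is
  induction is with
  | nil => intro _ stA stB h; exact h
  | cons i is ih =>
    intro his stA stB h
    rw [List.foldl_cons, List.foldl_cons]
    refine ih (fun i' hi' => his i' (List.mem_cons_of_mem _ hi')) _ _ ?_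
    exact fold_inner hfuel (his i (List.mem_cons_self)) (PySem.List.pyRange 0 M 1)
      (fun j hj => (PySem.List.mem_pyRange_one).1 hj) stA stB h

lemma rel_init (maps : List String) :
    RelAB maps (maps.length : Int) (((PySem.List.pyGet? maps 0).getD "").toList.length : Int)
      ((List.replicate (maps.length : Int).toNat
        (List.replicate (((PySem.List.pyGet? maps 0).getD "").toList.length : Int).toNat (0 : Int))),
        ([] : List Int))
      ((PySem.Set.empty : PySem.Set (Int × Int)), ([] : List Int)) := by
  refine ⟨shapeV_replicate _ _, ?_, rfl⟩
  intro p _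
  unfold markedA markedB
  rw [vget_replicate]
  simp [PySem.Set.empty]

lemma final_eq {l1 l2 : List Int} (h : l1 = l2) :
    (if l1.length = 0 then ([-1] : List Int) else PySem.List.sorted l1 (fun x => x) false)
      = (if l2.isEmpty then ([-1] : List Int) else PySem.List.sorted l2 (fun x => x) false) := by
  subst h
  cases l1 with
  | nil => rfl
  | cons a t => simp

-- ===== VERDICT (by name: the statement is the Claim_ definition above) =====
theorem solution_spec : Claim_equal_solution := by
  intro maps _ _
  unfold Spec_solution
  have hrel := fold_outer (maps := maps)
      (N := (maps.length : Int)) (M := (((PySem.List.pyGet? maps 0).getD "").toList.length : Int))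
      (fuel := 2 * ((maps.length : Int).toNat
        * (((PySem.List.pyGet? maps 0).getD "").toList.length : Int).toNat) + 1)
      rfl
      (PySem.List.pyRange 0 (maps.length : Int) 1)
      (fun i hi => (PySem.List.mem_pyRange_one).1 hi)
      ((List.replicate (maps.length : Int).toNat
        (List.replicate (((PySem.List.pyGet? maps 0).getD "").toList.length : Int).toNat (0 : Int))),
        ([] : List Int))
      ((PySem.Set.empty : PySem.Set (Int × Int)), ([] : List Int))
      (rel_init maps)
  exact final_eq hrel.2.2
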